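-- pv_equiv track=rewrite | github.com/s2yao/DSA-and-Leetcode | snowflake/sandbox.py | maxBarrier
-- ===== SOURCE A (Python) =====
-- def maxBarrier(n, initialEnergy, th):
--     initialEnergy.sort()  # Sort in ascending order
--     low = initialEnergy[0]
--     high = initialEnergy[-1]  # The largest element in the sorted list
--
--     while low < high:
--         mid = (low + high + 1) // 2
--         if sum(max(energy - mid, 0) for energy in initialEnergy) >= th:
--             low = mid  # Increase the barrier (move low up)
--         else:
--             high = mid - 1  # Lower the barrier (move high down)
--
--     return low  # Return the maximum barrier
-- ===== SOURCE B (Python) =====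
-- def maxBarrier(n, initialEnergy, th):
--     # Closed form: sort, then scan suffix sums of the k largest elements.
--     # The removed energy at barrier x is max over k of (topSum_k - k*x), so the
--     # largest feasible barrier is max_k (topSum_k - th) // k, clamped to [min, max].
--     initialEnergy.sort()
--     if th <= 0:
--         return initialEnergy[-1]
--     best = initialEnergy[0]
--     total = 0
--     k = 0
--     for e in reversed(initialEnergy):
--         total += e
--         k += 1
--         cand = (total - th) // k
--         if cand > best:
--             best = cand
--     return best
-- ===== Notes on version B (the rewrite author's own statement) =====
-- stated objective: faster
-- what changed: Replaced A's value-range binary search (each step rescanning the whole list to evaluate the removed energy) by a single closed-form pass over the suffix sums of the sorted list: the answer is max_k floor((sum of k largest - th)/k), clamped to [min, max].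
import Mathlib
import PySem

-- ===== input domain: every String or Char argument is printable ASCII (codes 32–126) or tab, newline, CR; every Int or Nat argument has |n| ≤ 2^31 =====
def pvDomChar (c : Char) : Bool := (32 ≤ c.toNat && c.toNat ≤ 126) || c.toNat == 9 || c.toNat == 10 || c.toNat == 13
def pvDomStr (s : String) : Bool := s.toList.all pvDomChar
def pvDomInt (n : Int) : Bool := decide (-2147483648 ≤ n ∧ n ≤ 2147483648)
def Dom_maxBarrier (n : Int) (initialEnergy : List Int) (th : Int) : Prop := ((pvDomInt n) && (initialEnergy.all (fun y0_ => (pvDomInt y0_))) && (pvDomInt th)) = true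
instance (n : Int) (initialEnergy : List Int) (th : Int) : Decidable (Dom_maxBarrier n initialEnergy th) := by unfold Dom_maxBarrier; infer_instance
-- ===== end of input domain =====

-- B replaces A's binary search over barrier values by one closed-form pass over suffix
-- sums of the sorted list (faster). Both Pythons sort the argument list in place; the
-- equivalence proved here is about the return value only (B performs the same mutation).

-- ===== PORT A =====
-- sum(max(energy - mid, 0) for energy in initialEnergy)
def pvRemoved (s : List Int) (mid : Int) : Int :=
  (s.map (fun energy => max (energy - mid) 0)).sum

-- the while-loop of A: while low < high: … (fuel makes the recursion structural;
-- the interval shrinks each step, so fuel (high-low)+1 always suffices)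
def pvALoop (s : List Int) (th : Int) (fuel : Nat) (low high : Int) : Int :=
  match fuel with
  | 0 => low
  | fuel + 1 =>
    if low < high then
      let mid := PySem.Int.floordiv (low + high + 1) 2
      if pvRemoved s mid ≥ th then
        pvALoop s th fuel mid high
      else
        pvALoop s th fuel low (mid - 1)
    else low

def maxBarrier (n : Int) (initialEnergy : List Int) (th : Int) : Int :=
  let s := PySem.List.sorted initialEnergy (fun x => x) false
  let low := PySem.List.pyGetD s 0 0
  let high := PySem.List.pyGetD s (-1) 0
  pvALoop s th ((high - low).toNat + 1) low high

-- ===== PORT B =====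
def maxBarrier_alt (n : Int) (initialEnergy : List Int) (th : Int) : Int :=
  let s := PySem.List.sorted initialEnergy (fun x => x) false
  if th ≤ 0 then
    PySem.List.pyGetD s (-1) 0
  else
    let st := s.reverse.foldl
      (fun (acc : Int × Int × Int) e =>
        let total := acc.1 + e
        let k := acc.2.1 + 1
        let cand := PySem.Int.floordiv (total - th) k
        (total, k, if cand > acc.2.2 then cand else acc.2.2))
      (0, 0, PySem.List.pyGetD s 0 0)
    st.2.2

-- ===== PRECONDITION & SPEC =====
-- Pre_ excludes only the empty list, on which A raises IndexError (initialEnergy[0]).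
def Pre_maxBarrier (n : Int) (initialEnergy : List Int) (th : Int) : Prop := initialEnergy ≠ []
instance (n : Int) (initialEnergy : List Int) (th : Int) : Decidable (Pre_maxBarrier n initialEnergy th) := by unfold Pre_maxBarrier; infer_instance

def pvWitness_maxBarrier : Int × List Int × Int := (3, [1, 5, 2], 4)

def Spec_maxBarrier (n : Int) (initialEnergy : List Int) (th : Int) (out : Int) : Prop := out = maxBarrier_alt n initialEnergy th
instance (n : Int) (initialEnergy : List Int) (th : Int) (out : Int) : Decidable (Spec_maxBarrier n initialEnergy th out) := by unfold Spec_maxBarrier; infer_instance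

-- ===== CLAIM (what is proved, stated in full; the proofs are below) =====
def Claim_equal_maxBarrier : Prop := ∀ (n : Int) (initialEnergy : List Int) (th : Int), Dom_maxBarrier n initialEnergy th → Pre_maxBarrier n initialEnergy th → Spec_maxBarrier n initialEnergy th (maxBarrier n initialEnergy th)

-- ===== LEMMAS AND PROOFS =====

theorem pvRemoved_nonneg (s : List Int) (x : Int) : 0 ≤ pvRemoved s x := by
  unfold pvRemoved
  induction s with
  | nil => simp
  | cons a t ih => simp [List.sum_cons]; positivity

theorem pvRemoved_antitone (s : List Int) {x y : Int} (h : x ≤ y) :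
    pvRemoved s y ≤ pvRemoved s x := by
  unfold pvRemoved
  induction s with
  | nil => simp
  | cons a t ih =>
    simp only [List.map_cons, List.sum_cons]
    have : max (a - y) 0 ≤ max (a - x) 0 := by
      apply max_le_max _ le_rfl; omega
    omega

theorem pvRemoved_take_lb (t : List Int) (x : Int) :
    ∀ k : Nat, k ≤ t.length → ((t.take k).sum : Int) - (k : Int) * x ≤ pvRemoved t x := by
  induction t with
  | nil => intro k hk; simp at hk; simp [hk, pvRemoved]
  | cons a t ih =>
    intro k hk
    cases k with
    | zero => simpa using pvRemoved_nonneg (a :: t) x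
    | succ j =>
      simp only [List.take_succ_cons, List.sum_cons, pvRemoved, List.map_cons]
      have h1 := ih j (by simpa using hk)
      have h2 : a - x ≤ max (a - x) 0 := le_max_left _ _
      unfold pvRemoved at h1
      push_cast
      nlinarith [h1, h2]

theorem pvRemoved_reverse (s : List Int) (x : Int) :
    pvRemoved s.reverse x = pvRemoved s x := by
  unfold pvRemoved
  rw [List.map_reverse, List.sum_reverse]

theorem pvRemoved_all_gt (s : List Int) (x : Int) (h : ∀ y ∈ s, x < y) :
    pvRemoved s x = s.sum - (s.length : Int) * x := by
  unfold pvRemoved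
  induction s with
  | nil => simp
  | cons a t ih =>
    have ha : x < a := h a (by simp)
    have := ih (fun y hy => h y (List.mem_cons_of_mem _ hy))
    simp only [List.map_cons, List.sum_cons, List.length_cons, this]
    have : max (a - x) 0 = a - x := by omega
    rw [this]; push_cast; ring

-- for an ascending list the removed energy is a suffix sum minus a multiple of x
theorem pvRemoved_ex_c (s : List Int) (x : Int) (hs : s.Pairwise (· ≤ ·)) :
    ∃ c : Nat, c ≤ s.length ∧ pvRemoved s x = ((s.reverse.take c).sum : Int) - (c : Int) * x := by
  induction s with
  | nil => exact ⟨0, by simp, by simp [pvRemoved]⟩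
  | cons a t ih =>
    rcases List.pairwise_cons.mp hs with ⟨hle, ht⟩
    by_cases hax : a ≤ x
    · rcases ih ht with ⟨c, hc, hceq⟩
      refine ⟨c, by simp; omega, ?_⟩
      have htake : (a :: t).reverse.take c = t.reverse.take c := by
        simp only [List.reverse_cons]
        exact List.take_append_of_le_length (by simpa using hc)
      rw [htake, ← hceq]
      simp only [pvRemoved, List.map_cons, List.sum_cons]
      have : max (a - x) 0 = 0 := by omega
      omega
    · push_neg at hax
      have hall : ∀ y ∈ (a :: t), x < y := by
        intro y hy
        rcases List.mem_cons.mp hy with rfl | hy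
        · exact hax
        · exact lt_of_lt_of_le hax (hle y hy)
      refine ⟨(a :: t).length, le_rfl, ?_⟩
      rw [pvRemoved_all_gt _ _ hall]
      have : (a :: t).reverse.take (a :: t).length = (a :: t).reverse := by simp
      rw [this, List.sum_reverse]

-- A's loop: result r satisfies low ≤ r ≤ high, (th ≤ removed r or r = low),
-- and every x in (r, high] has removed x < th
theorem pvALoop_spec (s : List Int) (th : Int) :
    ∀ (fuel : Nat) (low high : Int), (high - low).toNat < fuel → low ≤ high →
      low ≤ pvALoop s th fuel low high ∧ pvALoop s th fuel low high ≤ high ∧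
      (th ≤ pvRemoved s (pvALoop s th fuel low high) ∨ pvALoop s th fuel low high = low) ∧
      (∀ x : Int, pvALoop s th fuel low high < x → x ≤ high → pvRemoved s x < th) := by
  intro fuel
  induction fuel with
  | zero =>
    intro low high hN hlh
    omega
  | succ N ih =>
    intro low high hN hlh
    by_cases hlt : low < high
    · rw [pvALoop]
      simp only [hlt, if_true]
      set mid := PySem.Int.floordiv (low + high + 1) 2 with hmid
      have hmidb : low < mid ∧ mid ≤ high := by
        rw [hmid, PySem.Int.floordiv_eq_ediv_of_pos (show (0:Int) < 2 by norm_num)]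
        omega
      by_cases hp : pvRemoved s mid ≥ th
      · simp only [hp, if_true]
        obtain ⟨r1, r2, r3, r4⟩ := ih mid high (by omega) (by omega)
        refine ⟨by omega, r2, ?_, r4⟩
        rcases r3 with h | h
        · exact Or.inl h
        · exact Or.inl (by rw [h]; exact hp)
      · simp only [hp, if_false]
        obtain ⟨r1, r2, r3, r4⟩ := ih low (mid - 1) (by omega) (by omega)
        refine ⟨r1, by omega, r3, ?_⟩
        intro x hx1 hx2
        by_cases hxm : x ≤ mid - 1
        · exact r4 x hx1 hxm
        · have : mid ≤ x := by omega
          calc pvRemoved s x ≤ pvRemoved s mid := pvRemoved_antitone s this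
            _ < th := by omega
    · have : low = high := by omega
      subst this
      rw [pvALoop, if_neg (lt_irrefl _)]
      exact ⟨le_rfl, le_rfl, Or.inr rfl, fun x h1 h2 => by omega⟩

-- B's fold invariant: the final best is the initial best or some candidate,
-- is at least the initial best, and dominates every candidate
theorem pvFold_spec (th : Int) :
    ∀ (t : List Int) (T0 k0 b0 : Int),
      b0 ≤ (t.foldl
        (fun (acc : Int × Int × Int) e =>
          let total := acc.1 + e
          let k := acc.2.1 + 1
          let cand := PySem.Int.floordiv (total - th) k
          (total, k, if cand > acc.2.2 then cand else acc.2.2))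
        (T0, k0, b0)).2.2 ∧
      ((t.foldl
        (fun (acc : Int × Int × Int) e =>
          let total := acc.1 + e
          let k := acc.2.1 + 1
          let cand := PySem.Int.floordiv (total - th) k
          (total, k, if cand > acc.2.2 then cand else acc.2.2))
        (T0, k0, b0)).2.2 = b0 ∨
        ∃ j : Nat, 1 ≤ j ∧ j ≤ t.length ∧
          (t.foldl
            (fun (acc : Int × Int × Int) e =>
              let total := acc.1 + e
              let k := acc.2.1 + 1
              let cand := PySem.Int.floordiv (total - th) k
              (total, k, if cand > acc.2.2 then cand else acc.2.2))
            (T0, k0, b0)).2.2 = PySem.Int.floordiv (T0 + ((t.take j).sum : Int) - th) (k0 + (j : Int))) ∧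
      (∀ j : Nat, 1 ≤ j → j ≤ t.length →
        PySem.Int.floordiv (T0 + ((t.take j).sum : Int) - th) (k0 + (j : Int)) ≤
          (t.foldl
            (fun (acc : Int × Int × Int) e =>
              let total := acc.1 + e
              let k := acc.2.1 + 1
              let cand := PySem.Int.floordiv (total - th) k
              (total, k, if cand > acc.2.2 then cand else acc.2.2))
            (T0, k0, b0)).2.2) := by
  intro t
  induction t with
  | nil =>
    intro T0 k0 b0
    refine ⟨le_rfl, Or.inl rfl, ?_⟩
    intro j hj1 hj2; simp at hj2; omega
  | cons e t ih =>
    intro T0 k0 b0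
    simp only [List.foldl_cons]
    set cand := PySem.Int.floordiv (T0 + e - th) (k0 + 1) with hcand
    set b1 := if cand > b0 then cand else b0 with hb1
    obtain ⟨i1, i2, i3⟩ := ih (T0 + e) (k0 + 1) b1
    have hb01 : b0 ≤ b1 := by rw [hb1]; split <;> omega
    have hcb1 : cand ≤ b1 := by rw [hb1]; split <;> omega
    refine ⟨le_trans hb01 i1, ?_, ?_⟩
    · rcases i2 with h | ⟨j, hj1, hj2, hj3⟩
      · rw [h, hb1]
        split
        · exact Or.inr ⟨1, le_rfl, by simp, by simpa using hcand⟩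
        · exact Or.inl rfl
      · refine Or.inr ⟨j + 1, by omega, by simp; omega, ?_⟩
        rw [hj3]
        congr 1
        · push_cast; simp [List.take_succ_cons]; ring
        · push_cast; ring
    · intro j hj1 hj2
      cases j with
      | zero => omega
      | succ j' =>
        cases Nat.eq_or_lt_of_le hj1 with
        | inl h =>
          have : j' = 0 := by omega
          subst this
          simp only [List.take_succ_cons, List.take_zero, List.sum_cons, List.sum_nil]
          calc PySem.Int.floordiv (T0 + (e + 0) - th) (k0 + (1:Nat)) = cand := by
                rw [hcand]; norm_num
            _ ≤ b1 := hcb1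
            _ ≤ _ := i1
        | inr h =>
          have hj'1 : 1 ≤ j' := by omega
          have := i3 j' hj'1 (by simp at hj2; omega)
          calc PySem.Int.floordiv (T0 + (((e :: t).take (j' + 1)).sum : Int) - th) (k0 + ((j' + 1 : Nat) : Int))
              = PySem.Int.floordiv (T0 + e + ((t.take j').sum : Int) - th) (k0 + 1 + (j' : Int)) := by
                congr 1
                · simp [List.take_succ_cons]; ring
                · push_cast; ring
            _ ≤ _ := this

theorem pv_le_getLast (l : List Int) (h : l ≠ []) (hpw : l.Pairwise (· ≤ ·)) :
    ∀ y ∈ l, y ≤ l.getLast h := by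
  induction l with
  | nil => simp at h
  | cons x t ih =>
    intro y hy
    rcases List.pairwise_cons.mp hpw with ⟨hx, ht⟩
    cases t with
    | nil => simp at hy; simp [hy, List.getLast]
    | cons z t' =>
      rw [List.getLast_cons (by simp)]
      rcases List.mem_cons.mp hy with rfl | hy'
      · exact le_trans (hx _ (List.getLast_mem _)) le_rfl
      · exact ih (by simp) ht y hy'

-- main bridge: A's loop over [min, max] equals B's closed form, on any sorted nonempty list
theorem pvMain (s : List Int) (th : Int) (hsne : s ≠ []) (hpw : s.Pairwise (· ≤ ·)) :
    pvALoop s th (((PySem.List.pyGetD s (-1) 0) - (PySem.List.pyGetD s 0 0)).toNat + 1) (PySem.List.pyGetD s 0 0) (PySem.List.pyGetD s (-1) 0) =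
      (if th ≤ 0 then PySem.List.pyGetD s (-1) 0
       else (s.reverse.foldl
          (fun (acc : Int × Int × Int) e =>
            let total := acc.1 + e
            let k := acc.2.1 + 1
            let cand := PySem.Int.floordiv (total - th) k
            (total, k, if cand > acc.2.2 then cand else acc.2.2))
          (0, 0, PySem.List.pyGetD s 0 0)).2.2) := by
  set a := PySem.List.pyGetD s 0 0 with ha
  set b := PySem.List.pyGetD s (-1) 0 with hbdef
  have hbl : b = s.getLast hsne := PySem.List.pyGetD_neg_one s 0 hsne
  have hmax : ∀ y ∈ s, y ≤ b := by rw [hbl]; exact pv_le_getLast s hsne hpw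
  have hamem : a ∈ s := by
    cases s with
    | nil => exact absurd rfl hsne
    | cons m t => rw [ha, PySem.List.pyGetD_zero_cons]; simp
  have hab : a ≤ b := hmax a hamem
  obtain ⟨r1, r2, r3, r4⟩ := pvALoop_spec s th ((b - a).toNat + 1) a b (by omega) hab
  by_cases hth : th ≤ 0
  · rw [if_pos hth]
    rcases lt_or_eq_of_le r2 with hlt | heq
    · have := r4 b hlt le_rfl
      have := pvRemoved_nonneg s b
      omega
    · exact heq
  · rw [if_neg hth]
    push_neg at hth
    obtain ⟨f1, f2, f3⟩ := pvFold_spec th s.reverse 0 0 a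
    set B := (s.reverse.foldl
          (fun (acc : Int × Int × Int) e =>
            let total := acc.1 + e
            let k := acc.2.1 + 1
            let cand := PySem.Int.floordiv (total - th) k
            (total, k, if cand > acc.2.2 then cand else acc.2.2))
          (0, 0, a)).2.2 with hBdef
    have hsumle : ∀ j : Nat, (((s.reverse.take j).sum : Int)) ≤ (j : Int) * b ∨ j > s.reverse.length := by
      intro j
      by_cases hj : j ≤ s.reverse.length
      · left
        have hmem : ∀ x ∈ s.reverse.take j, x ≤ b := by
          intro x hx
          exact hmax x (List.mem_reverse.mp (List.mem_of_mem_take hx))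
        have := List.sum_le_card_nsmul (s.reverse.take j) b hmem
        have hj' : j ≤ s.length := by simpa using hj
        have hlen : (s.reverse.take j).length = j := by
          rw [List.length_take]; simp only [List.length_reverse]; omega
        rw [hlen] at this
        simpa [nsmul_eq_mul] using this
      · right; omega
    have hBb : B ≤ b := by
      rcases f2 with h | ⟨j, hj1, hj2, hj3⟩
      · rw [h]; exact hab
      · rw [hj3]
        apply le_of_lt
        have hjpos : (0:Int) < 0 + (j:Int) := by push_cast; omega
        rw [PySem.Int.floordiv_lt_iff_lt_mul hjpos]
        rcases hsumle j with hs1 | hs2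
        · nlinarith
        · omega
    have hPB : th ≤ pvRemoved s B ∨ B = a := by
      rcases f2 with h | ⟨j, hj1, hj2, hj3⟩
      · exact Or.inr h
      · left
        have hjpos : (0:Int) < 0 + (j:Int) := by push_cast; omega
        have hle : B ≤ PySem.Int.floordiv (0 + ((s.reverse.take j).sum : Int) - th) (0 + (j:Int)) := le_of_eq hj3
        rw [PySem.Int.le_floordiv_iff_mul_le hjpos] at hle
        have := pvRemoved_take_lb s.reverse B j hj2
        rw [pvRemoved_reverse] at this
        nlinarith
    have hnP : ∀ x : Int, B < x → pvRemoved s x < th := by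
      intro x hx
      obtain ⟨c, hc, hceq⟩ := pvRemoved_ex_c s x hpw
      cases Nat.eq_zero_or_pos c with
      | inl h0 => subst h0; simp at hceq; omega
      | inr hcpos =>
        have hcl : c ≤ s.reverse.length := by simpa using hc
        have := f3 c hcpos hcl
        have hcposZ : (0:Int) < 0 + (c:Int) := by push_cast; omega
        have hxgt : ¬ (x ≤ PySem.Int.floordiv (0 + ((s.reverse.take c).sum : Int) - th) (0 + (c:Int))) := by omega
        rw [PySem.Int.le_floordiv_iff_mul_le hcposZ] at hxgt
        push_neg at hxgt
        rw [hceq]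
        nlinarith
    rcases lt_trichotomy (pvALoop s th ((b - a).toNat + 1) a b) B with hlt | heq | hgt
    · exfalso
      rcases hPB with hp | hBa
      · have := r4 B hlt hBb; omega
      · omega
    · exact heq
    · exfalso
      have hrem := hnP _ hgt
      rcases r3 with hp | hra
      · omega
      · omega

-- ===== VERDICT (by name: the statement is the Claim_ definition above) =====
theorem maxBarrier_spec : Claim_equal_maxBarrier := by
  intro n initialEnergy th _hDom hPre
  have hne : initialEnergy ≠ [] := hPre
  simp only [Spec_maxBarrier, maxBarrier, maxBarrier_alt]
  have hsne : PySem.List.sorted initialEnergy (fun x => x) false ≠ [] := by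
    intro h
    exact hne ((PySem.List.sorted_eq_nil_iff _ _ _).mp h)
  have hpw : (PySem.List.sorted initialEnergy (fun x => x) false).Pairwise (· ≤ ·) := by
    simpa using PySem.List.sorted_pairwise (xs := initialEnergy) (key := fun x => x)
  exact pvMain _ th hsne hpw
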